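-- pv_equiv track=rewrite | github.com/iboIPS/path-planner | src/planners/dwa.py | _clearance
-- ===== SOURCE A (Python) =====
-- from typing import List, Tuple
--
-- Point = Tuple[int, int]
--
-- Grid = List[List[int]]
--
-- def _clearance(grid: Grid, point: Point, radius: int = 3) -> int:
--     x0, y0 = point
--     best = radius + 1
--     for dy in range(-radius, radius + 1):
--         for dx in range(-radius, radius + 1):
--             x, y = x0 + dx, y0 + dy
--             if 0 <= x < len(grid) and 0 <= y < len(grid):
--                 if grid[y][x] == 1:
--                     best = min(best, abs(dx) + abs(dy))
--     return best if best <= radius else radius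
-- ===== SOURCE B (Python) =====
-- def _clearance(grid, point, radius=3):
--     # Expanding-ring search: scan Manhattan rings of growing distance d and
--     # return the first d whose ring contains an in-bounds obstacle; same
--     # square-grid bounds test (both coords against len(grid)) as the original.
--     x0, y0 = point
--     n = len(grid)
--     for d in range(0, radius + 1):
--         for dx in range(-d, d + 1):
--             rem = d - abs(dx)
--             for dy in ((rem,) if rem == 0 else (rem, -rem)):
--                 x, y = x0 + dx, y0 + dy
--                 if 0 <= x < n and 0 <= y < n and grid[y][x] == 1:
--                     return d
--     return radius
-- ===== Notes on version B (the rewrite author's own statement) =====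
-- stated objective: alternative
-- what changed: Replaces the full (2r+1)x(2r+1) window min-scan with an expanding-ring search that enumerates cells at Manhattan distance d for d = 0..radius and returns the first d whose ring holds an in-bounds obstacle (radius if none).
import Mathlib
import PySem

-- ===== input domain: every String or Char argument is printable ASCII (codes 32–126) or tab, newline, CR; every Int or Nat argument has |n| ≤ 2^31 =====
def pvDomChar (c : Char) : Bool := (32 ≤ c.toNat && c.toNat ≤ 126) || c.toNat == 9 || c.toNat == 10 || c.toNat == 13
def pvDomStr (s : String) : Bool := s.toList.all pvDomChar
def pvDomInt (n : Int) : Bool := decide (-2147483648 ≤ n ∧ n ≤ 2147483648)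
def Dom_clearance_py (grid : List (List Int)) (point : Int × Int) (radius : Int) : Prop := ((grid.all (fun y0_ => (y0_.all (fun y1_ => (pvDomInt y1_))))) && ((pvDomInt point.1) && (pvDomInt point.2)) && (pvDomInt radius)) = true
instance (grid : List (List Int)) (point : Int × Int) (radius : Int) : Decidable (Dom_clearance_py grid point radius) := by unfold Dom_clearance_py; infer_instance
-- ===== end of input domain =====

-- B replaces the full-window min-scan with an expanding-ring search returning the first
-- Manhattan distance whose ring holds an in-bounds obstacle (alternative decomposition).


-- ===== PORT A =====
-- grid[y][x]; exact whenever 0 ≤ y < len grid and 0 ≤ x < len (grid[y]) (guaranteed under Pre_)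
def pvCell (grid : List (List Int)) (y x : Int) : Int :=
  PySem.List.pyGetD (PySem.List.pyGetD grid y []) x 0

-- the body of A's inner loop, for one (dy, dx)
def pvStepA (grid : List (List Int)) (x0 y0 dy b dx : Int) : Int :=
  let x := x0 + dx
  let y := y0 + dy
  if 0 ≤ x ∧ x < (grid.length : Int) ∧ 0 ≤ y ∧ y < (grid.length : Int) then
    if pvCell grid y x = 1 then min b (|dx| + |dy|) else b
  else b

def clearance_py (grid : List (List Int)) (point : Int × Int) (radius : Int) : Int :=
  let x0 := point.1
  let y0 := point.2
  let best := (PySem.List.pyRange (-radius) (radius + 1) 1).foldl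
    (fun b dy => (PySem.List.pyRange (-radius) (radius + 1) 1).foldl (pvStepA grid x0 y0 dy) b)
    (radius + 1)
  if best ≤ radius then best else radius

-- ===== PORT B =====
-- does the ring of Manhattan distance d around (x0, y0) contain an in-bounds obstacle?
def pvRingHit (grid : List (List Int)) (x0 y0 d : Int) : Bool :=
  (PySem.List.pyRange (-d) (d + 1) 1).any fun dx =>
    let rem := d - |dx|
    (if rem = 0 then [rem] else [rem, -rem]).any fun dy =>
      let x := x0 + dx
      let y := y0 + dy
      decide (0 ≤ x ∧ x < (grid.length : Int) ∧ 0 ≤ y ∧ y < (grid.length : Int)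
              ∧ pvCell grid y x = 1)

-- the 'for d in range(0, radius+1)' loop with early return: fuel = number of remaining d's
def pvFindRing (grid : List (List Int)) (x0 y0 : Int) : Nat → Int → Option Int
  | 0, _ => none
  | n + 1, d => if pvRingHit grid x0 y0 d then some d else pvFindRing grid x0 y0 n (d + 1)

def clearance_py_alt (grid : List (List Int)) (point : Int × Int) (radius : Int) : Int :=
  match pvFindRing grid point.1 point.2 (radius + 1).toNat 0 with
  | some d => d
  | none => radius

-- ===== PRECONDITION & SPEC =====
-- Pre_ excludes exactly the inputs where Python A raises IndexError: a ragged grid where some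
-- window cell passes the square bounds test (both coords against len(grid)) but its row is
-- shorter than the x index being read.
def Pre_clearance_py (grid : List (List Int)) (point : Int × Int) (radius : Int) : Prop :=
  ∀ y ∈ List.range grid.length, ∀ x ∈ List.range grid.length,
    |(y : Int) - point.2| ≤ radius → |(x : Int) - point.1| ≤ radius →
      (x : Int) < ((grid.getD y []).length : Int)

instance (grid : List (List Int)) (point : Int × Int) (radius : Int) :
    Decidable (Pre_clearance_py grid point radius) := by
  unfold Pre_clearance_py; infer_instance

def pvWitness_clearance_py : List (List Int) × (Int × Int) × Int := ([[0, 1], [1, 0]], (0, 0), 2)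

def Spec_clearance_py (grid : List (List Int)) (point : Int × Int) (radius : Int) (out : Int) : Prop := out = clearance_py_alt grid point radius
instance (grid : List (List Int)) (point : Int × Int) (radius : Int) (out : Int) : Decidable (Spec_clearance_py grid point radius out) := by unfold Spec_clearance_py; infer_instance

-- ===== CLAIM (what is proved, stated in full; the proofs are below) =====
def Claim_equal_clearance_py : Prop := ∀ (grid : List (List Int)) (point : Int × Int) (radius : Int), Dom_clearance_py grid point radius → Pre_clearance_py grid point radius → Spec_clearance_py grid point radius (clearance_py grid point radius)

-- ===== LEMMAS AND PROOFS =====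

-- there is an in-bounds obstacle at offset (dx, dy) (A's two if-tests, conjoined)
def pvP (grid : List (List Int)) (x0 y0 dx dy : Int) : Prop :=
  0 ≤ x0 + dx ∧ x0 + dx < (grid.length : Int) ∧ 0 ≤ y0 + dy ∧ y0 + dy < (grid.length : Int)
    ∧ pvCell grid (y0 + dy) (x0 + dx) = 1

-- generic min-fold bounds
lemma pv_fold_le_init {α : Type} (g : Int → α → Int) (hg : ∀ b a, g b a ≤ b) :
    ∀ (l : List α) (b : Int), l.foldl g b ≤ b := by
  intro l
  induction l with
  | nil => intro b; simp
  | cons x xs ih => intro b; exact le_trans (ih (g b x)) (hg b x)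

lemma pv_fold_lb {α : Type} (g : Int → α → Int) (c : Int) (hg : ∀ b a, c ≤ b → c ≤ g b a) :
    ∀ (l : List α) (b : Int), c ≤ b → c ≤ l.foldl g b := by
  intro l
  induction l with
  | nil => intro b hb; simpa using hb
  | cons x xs ih => intro b hb; exact ih (g b x) (hg b x hb)

lemma pv_fold_le_of_mem {α : Type} [DecidableEq α] (g : Int → α → Int)
    (hg : ∀ b a, g b a ≤ b) (a : α) (v : Int) (hav : ∀ b, g b a ≤ v) :
    ∀ (l : List α) (b : Int), a ∈ l → l.foldl g b ≤ v := by
  intro l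
  induction l with
  | nil => intro b h; simp at h
  | cons x xs ih =>
    intro b h
    by_cases hx : a = x
    · subst hx
      exact le_trans (pv_fold_le_init g hg xs (g b a)) (hav b)
    · exact ih (g b x) (by simpa [hx] using h)

lemma pvStepA_le (grid : List (List Int)) (x0 y0 dy b dx : Int) :
    pvStepA grid x0 y0 dy b dx ≤ b := by
  unfold pvStepA
  dsimp only
  split_ifs <;> simp [min_le_left]

-- A's best is bounded below by any lower bound of all obstacle distances
lemma pv_bestA_lb (grid : List (List Int)) (x0 y0 radius c : Int)
    (hc : ∀ dx dy, pvP grid x0 y0 dx dy → c ≤ |dx| + |dy|) (b : Int) (hb : c ≤ b) :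
    c ≤ (PySem.List.pyRange (-radius) (radius + 1) 1).foldl
      (fun b dy => (PySem.List.pyRange (-radius) (radius + 1) 1).foldl (pvStepA grid x0 y0 dy) b)
      b := by
  refine pv_fold_lb _ c (fun b dy hb => ?_) _ b hb
  refine pv_fold_lb _ c (fun b dx hb => ?_) _ b hb
  unfold pvStepA
  dsimp only
  split_ifs with h1 h2
  · exact le_min hb (hc dx dy ⟨h1.1, h1.2.1, h1.2.2.1, h1.2.2.2, h2⟩)
  · exact hb
  · exact hb

-- A's best is at most the distance of any obstacle inside the window
lemma pv_bestA_ub (grid : List (List Int)) (x0 y0 radius dx dy : Int)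
    (hdx : |dx| ≤ radius) (hdy : |dy| ≤ radius) (hP : pvP grid x0 y0 dx dy) (b : Int) :
    (PySem.List.pyRange (-radius) (radius + 1) 1).foldl
      (fun b dy => (PySem.List.pyRange (-radius) (radius + 1) 1).foldl (pvStepA grid x0 y0 dy) b)
      b ≤ |dx| + |dy| := by
  have hmemy : dy ∈ PySem.List.pyRange (-radius) (radius + 1) 1 := by
    rw [PySem.List.mem_pyRange_one]
    constructor
    · linarith [neg_abs_le dy]
    · linarith [le_abs_self dy]
  have hmemx : dx ∈ PySem.List.pyRange (-radius) (radius + 1) 1 := by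
    rw [PySem.List.mem_pyRange_one]
    constructor
    · linarith [neg_abs_le dx]
    · linarith [le_abs_self dx]
  refine pv_fold_le_of_mem _ (fun b dy => pv_fold_le_init _ (pvStepA_le grid x0 y0 dy) _ b)
    dy (|dx| + |dy|) (fun b => ?_) _ b hmemy
  refine pv_fold_le_of_mem _ (pvStepA_le grid x0 y0 dy) dx (|dx| + |dy|) (fun b => ?_) _ b hmemx
  unfold pvStepA
  dsimp only
  rw [if_pos ⟨hP.1, hP.2.1, hP.2.2.1, hP.2.2.2.1⟩, if_pos hP.2.2.2.2]
  exact min_le_right _ _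

-- the ring test finds exactly the obstacles at Manhattan distance d
lemma pv_ringHit_iff (grid : List (List Int)) (x0 y0 d : Int) (hd : 0 ≤ d) :
    pvRingHit grid x0 y0 d = true ↔ ∃ dx dy, |dx| + |dy| = d ∧ pvP grid x0 y0 dx dy := by
  unfold pvRingHit
  rw [List.any_eq_true]
  constructor
  · rintro ⟨dx, hdx, hany⟩
    rw [PySem.List.mem_pyRange_one] at hdx
    have habs : |dx| ≤ d := abs_le.mpr ⟨hdx.1, by linarith [hdx.2]⟩
    simp only [List.any_eq_true] at hany
    obtain ⟨dy, hdy, hdec⟩ := hany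
    have hP := of_decide_eq_true hdec
    refine ⟨dx, dy, ?_, hP.1, hP.2.1, hP.2.2.1, hP.2.2.2.1, hP.2.2.2.2⟩
    have hrem : 0 ≤ d - |dx| := by omega
    by_cases h0 : d - |dx| = 0
    · rw [if_pos h0] at hdy
      simp at hdy
      subst hdy
      rw [h0]
      simpa using by omega
    · rw [if_neg h0] at hdy
      simp at hdy
      rcases hdy with h | h
      · subst h
        rw [abs_of_nonneg hrem]
        omega
      · subst h
        rw [abs_of_nonpos (by omega : |dx| - d ≤ 0)]
        omega

  · rintro ⟨dx, dy, hsum, hP⟩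
    have hdxle : |dx| ≤ d := by
      have := abs_nonneg dy; omega
    refine ⟨dx, ?_, ?_⟩
    · rw [PySem.List.mem_pyRange_one]
      have := abs_le.mp hdxle
      exact ⟨this.1, by linarith [this.2]⟩
    · simp only [List.any_eq_true]
      refine ⟨dy, ?_, decide_eq_true ⟨hP.1, hP.2.1, hP.2.2.1, hP.2.2.2.1, hP.2.2.2.2⟩⟩
      have hdyabs : |dy| = d - |dx| := by omega
      by_cases h0 : d - |dx| = 0
      · rw [if_pos h0]
        have : dy = 0 := by rw [h0] at hdyabs; exact abs_eq_zero.mp hdyabs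
        simp [this, h0]
      · rw [if_neg h0]
        rcases (abs_eq (by omega : (0:Int) ≤ d - |dx|)).mp hdyabs with h | h <;> simp [h]

lemma pv_findRing_some (grid : List (List Int)) (x0 y0 m : Int) :
    ∀ (n : Nat) (d0 : Int), d0 ≤ m → m < d0 + n → pvRingHit grid x0 y0 m = true →
      (∀ k, d0 ≤ k → k < m → pvRingHit grid x0 y0 k = false) →
      pvFindRing grid x0 y0 n d0 = some m := by
  intro n
  induction n with
  | zero => intro d0 h1 h2 _ _; exfalso; omega
  | succ n ih =>
    intro d0 h1 h2 hm hleast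
    unfold pvFindRing
    by_cases h0 : pvRingHit grid x0 y0 d0 = true
    · have : d0 = m := by
        by_contra hne
        have : d0 < m := by omega
        rw [hleast d0 le_rfl this] at h0
        simp at h0
      rw [if_pos h0, this]
    · rw [if_neg h0]
      have hne : d0 ≠ m := fun h => h0 (h ▸ hm)
      exact ih (d0 + 1) (by omega) (by omega) hm
        (fun k hk1 hk2 => hleast k (by omega) hk2)

lemma pv_findRing_none (grid : List (List Int)) (x0 y0 : Int) :
    ∀ (n : Nat) (d0 : Int), (∀ k, d0 ≤ k → k < d0 + n → pvRingHit grid x0 y0 k = false) →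
      pvFindRing grid x0 y0 n d0 = none := by
  intro n
  induction n with
  | zero => intro d0 _; rfl
  | succ n ih =>
    intro d0 h
    unfold pvFindRing
    rw [if_neg, ih (d0 + 1) (fun k hk1 hk2 => h k (by omega) (by omega))]
    rw [h d0 le_rfl (by omega)]
    simp

-- the equivalence, as a plain statement
lemma pv_main (grid : List (List Int)) (point : Int × Int) (radius : Int) :
    clearance_py grid point radius = clearance_py_alt grid point radius := by
  set x0 := point.1 with hx0
  set y0 := point.2 with hy0
  by_cases h : ∃ n : Nat, (n : Int) ≤ radius ∧ pvRingHit grid x0 y0 (n : Int) = true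
  · -- some obstacle within distance radius: both return the least such distance m
    set m := Nat.find h with hm
    obtain ⟨hmr, hmhit⟩ := Nat.find_spec h
    have hleast : ∀ k : Int, 0 ≤ k → k < (m : Int) → pvRingHit grid x0 y0 k = false := by
      intro k hk1 hk2
      have hk : k = ((k.toNat : Nat) : Int) := (Int.toNat_of_nonneg hk1).symm
      by_contra hcon
      have : pvRingHit grid x0 y0 ((k.toNat : Nat) : Int) = true := by
        rw [← hk]; simpa using hcon
      exact Nat.find_min h (by omega) ⟨by omega, this⟩
    have hrad : 0 ≤ radius := le_trans (by positivity) hmr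
    -- B returns m
    have hB : clearance_py_alt grid point radius = (m : Int) := by
      unfold clearance_py_alt
      rw [← hx0, ← hy0]
      rw [pv_findRing_some grid x0 y0 (m : Int) (radius + 1).toNat 0 (by positivity)
        (by rw [Int.toNat_of_nonneg (by omega)]; omega) hmhit
        (fun k hk1 hk2 => hleast k hk1 hk2)]
    -- A's best equals m
    have hlb : ∀ dx dy, pvP grid x0 y0 dx dy → (m : Int) ≤ |dx| + |dy| := by
      intro dx dy hP
      by_contra hcon
      push_neg at hcon
      have hdnn : 0 ≤ |dx| + |dy| := by positivity
      have hhit : pvRingHit grid x0 y0 (|dx| + |dy|) = true :=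
        (pv_ringHit_iff grid x0 y0 _ hdnn).mpr ⟨dx, dy, rfl, hP⟩
      rw [hleast _ hdnn hcon] at hhit
      simp at hhit
    obtain ⟨dx, dy, hsum, hP⟩ := (pv_ringHit_iff grid x0 y0 (m : Int) (by positivity)).mp hmhit
    have hdxr : |dx| ≤ radius := by have := abs_nonneg dy; omega
    have hdyr : |dy| ≤ radius := by have := abs_nonneg dx; omega
    unfold clearance_py
    rw [← hx0, ← hy0]
    have hub := pv_bestA_ub grid x0 y0 radius dx dy hdxr hdyr hP (radius + 1)
    have hlb' := pv_bestA_lb grid x0 y0 radius (m : Int) hlb (radius + 1) (by omega)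
    rw [hsum] at hub
    have hbest : (PySem.List.pyRange (-radius) (radius + 1) 1).foldl
        (fun b dy => (PySem.List.pyRange (-radius) (radius + 1) 1).foldl (pvStepA grid x0 y0 dy) b)
        (radius + 1) = (m : Int) := le_antisymm hub hlb'
    simp only [hbest]
    rw [if_pos hmr, hB]
  · -- no obstacle within distance radius: both return radius
    push_neg at h
    have hnone : ∀ k : Int, 0 ≤ k → k ≤ radius → pvRingHit grid x0 y0 k = false := by
      intro k hk1 hk2
      have hk : k = ((k.toNat : Nat) : Int) := (Int.toNat_of_nonneg hk1).symm
      by_contra hcon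
      have h1 : ((k.toNat : Nat) : Int) ≤ radius := by omega
      have h2 : pvRingHit grid x0 y0 ((k.toNat : Nat) : Int) = true := by
        rw [← hk]; simpa using hcon
      exact absurd h2 (by simpa using h k.toNat h1)
    have hB : clearance_py_alt grid point radius = radius := by
      unfold clearance_py_alt
      rw [← hx0, ← hy0]
      rw [pv_findRing_none grid x0 y0 (radius + 1).toNat 0
        (fun k hk1 hk2 => hnone k hk1 (by
          have := Int.toNat_le.mp (le_refl (radius + 1).toNat)
          omega))]
    have hlb : ∀ dx dy, pvP grid x0 y0 dx dy → radius + 1 ≤ |dx| + |dy| := by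
      intro dx dy hP
      by_contra hcon
      push_neg at hcon
      have hdnn : 0 ≤ |dx| + |dy| := by positivity
      have hhit : pvRingHit grid x0 y0 (|dx| + |dy|) = true :=
        (pv_ringHit_iff grid x0 y0 _ hdnn).mpr ⟨dx, dy, rfl, hP⟩
      rw [hnone _ hdnn (by omega)] at hhit
      simp at hhit
    unfold clearance_py
    rw [← hx0, ← hy0]
    have hlb' := pv_bestA_lb grid x0 y0 radius (radius + 1) hlb (radius + 1) le_rfl
    rw [if_neg (by omega), hB]

-- ===== VERDICT (by name: the statement is the Claim_ definition above) =====
theorem clearance_py_spec : Claim_equal_clearance_py := by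
  intro grid point radius _hdom _hpre
  unfold Spec_clearance_py
  exact pv_main grid point radius
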